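-- pv_equiv track=rewrite | github.com/woee3/algorithm | programers/135808_과일 장수.py | solution
-- ===== SOURCE A (Python) =====
-- def solution(k, m, score):
--     answer = 0
--     score.sort(reverse=True)
--     i = 0
--     box = 0
--     bad = k
--     while i < len(score):
--         if score[i] <= k:
--             box += 1
--             bad = min(bad, score[i])
--         if box == m:
--             answer += (bad*m)
--             box = 0
--             bad = k
--         i += 1
--     return answer
-- ===== SOURCE B (Python) =====
-- def solution(k, m, score):
--     score.sort(reverse=True)
--     good = [s for s in score if s <= k]
--     answer = 0
--     while m > 0 and len(good) >= m:
--         answer += min(good[:m]) * m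
--         good = good[m:]
--     return answer
-- ===== Notes on version B (the rewrite author's own statement) =====
-- stated objective: simpler
-- what changed: Replaces A's index/box-counter/running-min state machine over the sorted list with a filter of the in-range scores followed by chunking them into boxes of m and summing each box's min; B performs the same in-place sort mutation as A.
import Mathlib
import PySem

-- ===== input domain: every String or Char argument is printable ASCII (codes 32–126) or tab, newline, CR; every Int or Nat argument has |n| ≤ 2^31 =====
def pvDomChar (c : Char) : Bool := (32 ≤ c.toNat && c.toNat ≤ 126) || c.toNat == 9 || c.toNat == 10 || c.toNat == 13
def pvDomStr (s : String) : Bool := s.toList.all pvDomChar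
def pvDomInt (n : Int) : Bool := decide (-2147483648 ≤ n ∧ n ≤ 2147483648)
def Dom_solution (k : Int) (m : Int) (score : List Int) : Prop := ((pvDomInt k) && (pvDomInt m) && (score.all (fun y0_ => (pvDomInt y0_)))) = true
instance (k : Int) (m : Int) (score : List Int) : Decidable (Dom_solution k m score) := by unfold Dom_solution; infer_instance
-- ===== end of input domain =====

-- B replaces A's index/box-counter/running-min state machine with a filter of the in-range
-- scores followed by chunking into boxes of m and summing each box's min (objective: simpler).
-- A sorts `score` in place; B performs the same mutation, the claim is about the return value.

-- ===== PORT A =====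
-- A's while loop over the descending-sorted list, state (answer, box, bad).
def solutionLoop (k m : Int) : List Int → Int → Int → Int → Int
  | [], answer, _box, _bad => answer
  | s :: rest, answer, box, bad =>
    let box' := if s ≤ k then box + 1 else box
    let bad' := if s ≤ k then min bad s else bad
    if box' = m then solutionLoop k m rest (answer + bad' * m) 0 k
    else solutionLoop k m rest answer box' bad'

def solution (k : Int) (m : Int) (score : List Int) : Int :=
  solutionLoop k m (PySem.List.sorted score (fun x => x) true) 0 0 k

-- ===== PORT B =====
-- B's while loop: peel off the leading box good[:m] (its min via PySem.List.min?; the slice is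
-- nonempty under the loop guard, so min? is `some` and the `.getD 0` default is never used).
def chunkLoop (m : Int) (good : List Int) (answer : Int) : Int :=
  if h : 0 < m ∧ m ≤ (good.length : Int) then
    chunkLoop m (PySem.List.slice good (some m) none)
      (answer + ((PySem.List.min? (PySem.List.slice good none (some m)) (fun x => x)).getD 0) * m)
  else answer
termination_by good.length
decreasing_by
  rw [PySem.List.slice_from good (le_of_lt h.1)]
  simp only [List.length_drop]
  omega

def solution_alt (k : Int) (m : Int) (score : List Int) : Int :=
  chunkLoop m
    ((PySem.List.sorted score (fun x => x) true).filter (fun s => decide (s ≤ k))) 0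

-- ===== PRECONDITION & SPEC =====
def Spec_solution (k : Int) (m : Int) (score : List Int) (out : Int) : Prop := out = solution_alt k m score
instance (k : Int) (m : Int) (score : List Int) (out : Int) : Decidable (Spec_solution k m score out) := by unfold Spec_solution; infer_instance

-- ===== CLAIM (what is proved, stated in full; the proofs are below) =====
def Claim_equal_solution : Prop := ∀ (k : Int) (m : Int) (score : List Int), Dom_solution k m score → Spec_solution k m score (solution k m score)

-- ===== LEMMAS AND PROOFS =====

-- A's loop restricted to the accepted elements: `need` elements still wanted for the open box,
-- `bad` its running min; closing a box contributes min bad s * m and resets to (m, k).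
def genSum (k m : Int) : List Int → Int → Int → Int
  | [], _need, _bad => 0
  | s :: rest, need, bad =>
    if need = 1 then min bad s * m + genSum k m rest m k
    else genSum k m rest (need - 1) (min bad s)

theorem loop_nonpos (k m : Int) (hm : m ≤ 0) :
    ∀ (L : List Int) (ans box bad : Int), 0 ≤ box → solutionLoop k m L ans box bad = ans := by
  intro L
  induction L with
  | nil => intro ans box bad _; rfl
  | cons s rest ih =>
    intro ans box bad hbox
    simp only [solutionLoop]
    by_cases hs : s ≤ k
    · simp only [hs, if_true]
      rw [if_neg (show ¬ (box + 1 = m) by omega)]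
      exact ih _ _ _ (by omega)
    · simp only [hs, if_false]
      by_cases he : box = m
      · rw [if_pos he, ih _ _ _ (by omega)]
        have hm0 : m = 0 := by omega
        simp [hm0]
      · rw [if_neg he]
        exact ih _ _ _ hbox

theorem loop_eq_genSum (k m : Int) (hm : 0 < m) :
    ∀ (L : List Int) (ans box bad : Int), 0 ≤ box → box < m →
      solutionLoop k m L ans box bad
        = ans + genSum k m (L.filter (fun s => decide (s ≤ k))) (m - box) bad := by
  intro L
  induction L with
  | nil => intro ans box bad _ _; simp [solutionLoop, genSum]
  | cons s rest ih =>
    intro ans box bad hbox0 hboxm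
    by_cases hs : s ≤ k
    · have hf : (s :: rest).filter (fun s => decide (s ≤ k))
          = s :: rest.filter (fun s => decide (s ≤ k)) := by
        rw [List.filter_cons_of_pos (by simpa using hs)]
      rw [hf]
      simp only [solutionLoop, hs, if_true]
      by_cases he : box + 1 = m
      · rw [if_pos he, ih _ _ _ (le_refl 0) hm]
        have hneed : m - box = 1 := by omega
        rw [hneed]
        simp only [genSum, if_true]
        ring
      · rw [if_neg he, ih _ _ _ (by omega) (by omega)]
        have hneed : ¬ (m - box = 1) := by omega
        simp only [genSum, if_neg hneed]
        have h3 : m - box - 1 = m - (box + 1) := by ring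
        rw [h3]
    · have hne : ¬ (box = m) := by omega
      have hf : (s :: rest).filter (fun s => decide (s ≤ k))
          = rest.filter (fun s => decide (s ≤ k)) := by
        rw [List.filter_cons_of_neg (by simpa using hs)]
      rw [hf]
      simp only [solutionLoop, hs, if_false]
      rw [if_neg hne]
      exact ih _ _ _ hbox0 hboxm

-- one step of genSum as a full box: take `need`, min it into `bad`, recurse on the rest
theorem genSum_step (k m : Int) :
    ∀ (g : List Int) (need bad : Int), 0 < need →
      genSum k m g need bad
        = if need ≤ (g.length : Int) then
            (g.take need.toNat).foldl min bad * m + genSum k m (g.drop need.toNat) m k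
          else 0 := by
  intro g
  induction g with
  | nil =>
    intro need bad hneed
    simp only [genSum, List.length_nil]
    rw [if_neg (by exact_mod_cast by omega)]
  | cons s rest ih =>
    intro need bad hneed
    by_cases h1 : need = 1
    · subst h1
      simp only [genSum]
      rw [if_pos (show (1:Int) ≤ ((s :: rest).length : Int) by simp)]
      simp
    · have h2 : 2 ≤ need := by omega
      have htn : need.toNat = (need - 1).toNat + 1 := by omega
      simp only [genSum, if_neg h1]
      rw [ih (need - 1) (min bad s) (by omega), htn]
      simp only [List.take_succ_cons, List.drop_succ_cons, List.foldl_cons, List.length_cons]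
      by_cases hle : need - 1 ≤ (rest.length : Int)
      · rw [if_pos hle, if_pos (by push_cast; omega)]
      · rw [if_neg hle, if_neg (by push_cast; omega)]

theorem chunkLoop_eq_genSum (k m : Int) :
    ∀ (g : List Int) (ans : Int), 0 < m → (∀ x ∈ g, x ≤ k) →
      chunkLoop m g ans = ans + genSum k m g m k := by
  intro g ans
  induction g, ans using chunkLoop.induct m with
  | case1 g ans h ih =>
    intro hm hgk
    rw [PySem.List.slice_to g (le_of_lt hm), PySem.List.slice_from g (le_of_lt hm)] at ih
    have ih' := ih hm (fun y hy => hgk y (List.mem_of_mem_drop hy))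
    rw [chunkLoop, dif_pos h, PySem.List.slice_to g (le_of_lt hm),
      PySem.List.slice_from g (le_of_lt hm), genSum_step k m g m k hm, if_pos h.2]
    obtain ⟨x, t, hxt⟩ : ∃ x t, g.take m.toNat = x :: t := by
      cases htk : g.take m.toNat with
      | nil =>
        exfalso
        have := congrArg List.length htk
        simp only [List.length_take, List.length_nil] at this
        omega
      | cons x t => exact ⟨x, t, rfl⟩
    rw [hxt, PySem.List.min?_id_cons] at ih' ⊢
    have hx : x ∈ g := by
      have : x ∈ g.take m.toNat := by rw [hxt]; exact List.mem_cons_self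
      exact List.mem_of_mem_take this
    have hmin : List.foldl min k (x :: t) = List.foldl min x t := by
      rw [List.foldl_cons, min_comm, min_eq_left (hgk x hx)]
    rw [hmin]
    simp only [Option.getD_some] at ih' ⊢
    rw [ih']
    ring
  | case2 g ans h =>
    intro hm hgk
    rw [chunkLoop, dif_neg h, genSum_step k m g m k hm]
    rw [if_neg (by omega)]
    ring

theorem chunkLoop_nonpos (m : Int) (hm : m ≤ 0) (g : List Int) : chunkLoop m g 0 = 0 := by
  rw [chunkLoop, dif_neg (by omega)]

-- ===== VERDICT (by name: the statement is the Claim_ definition above) =====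
theorem solution_spec : Claim_equal_solution := by
  intro k m score _
  unfold Spec_solution solution solution_alt
  set L := PySem.List.sorted score (fun x => x) true with hL
  by_cases hm : 0 < m
  · rw [loop_eq_genSum k m hm L 0 0 k (le_refl 0) hm,
      chunkLoop_eq_genSum k m (L.filter (fun s => decide (s ≤ k))) 0 hm
        (fun x hx => by simpa using (List.of_mem_filter hx))]
    norm_num
  · rw [loop_nonpos k m (by omega) L 0 0 k (le_refl 0),
      chunkLoop_nonpos m (by omega)]
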